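-- pv_equiv track=rewrite | github.com/vanhuyz/neural-machine-translation-demo | train.py | grammar
-- ===== SOURCE A (Python) =====
-- def grammar(length):
--   mygrammar = [1, 0, 2]
--   if length <= 0:
--     raise ValueError('Length should be >= 1')
--   if length == 1:
--     return [0]
--   if length == 2:
--     return [1,0]
--   for i in range(3,length):
--     if length % 3 == 1 and i == length - 1:
--       next_pos = length - 1
--     else:
--       next_pos = mygrammar[i-3] + 3
--     mygrammar.append(next_pos)
--   return mygrammar
-- ===== SOURCE B (Python) =====
-- def grammar(length):
--   if length <= 0:
--     raise ValueError('Length should be >= 1')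
--   result = [[1, 0, 2][i % 3] + 3 * (i // 3) for i in range(length)]
--   if length % 3 == 1:
--     result[-1] = length - 1
--   return result
-- ===== Notes on version B (the rewrite author's own statement) =====
-- stated objective: idiomatic
-- what changed: Replaces the early returns and the backward-reference loop (each element read back from position i-3) with a closed-form comprehension value(i) = [1,0,2][i%3] + 3*(i//3) plus a single final override when length % 3 == 1.
import Mathlib
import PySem

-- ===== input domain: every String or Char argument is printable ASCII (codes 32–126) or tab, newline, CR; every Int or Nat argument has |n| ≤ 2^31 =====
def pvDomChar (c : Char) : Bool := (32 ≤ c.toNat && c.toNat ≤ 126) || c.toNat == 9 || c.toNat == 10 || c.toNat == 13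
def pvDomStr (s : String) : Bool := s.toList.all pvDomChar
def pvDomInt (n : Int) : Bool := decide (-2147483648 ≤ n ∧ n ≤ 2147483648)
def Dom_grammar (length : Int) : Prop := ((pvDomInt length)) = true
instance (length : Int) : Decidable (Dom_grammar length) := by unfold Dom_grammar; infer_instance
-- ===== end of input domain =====

-- B replaces A's backward-reference loop by a closed-form comprehension with one final override (idiomatic; same cost).

-- ===== PORT A =====
def grammar (length : Int) : List Int :=
  let mygrammar : List Int := [1, 0, 2]
  if length ≤ 0 then []          -- Python raises ValueError here; excluded by Pre_grammar
  else if length = 1 then [0]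
  else if length = 2 then [1, 0]
  else
    (PySem.List.pyRange 3 length 1).foldl (fun m i =>
      let next_pos : Int :=
        if PySem.Int.mod length 3 = 1 ∧ i = length - 1 then length - 1
        else PySem.List.pyGetD m (i - 3) 0 + 3   -- mygrammar[i-3]; index always in range here
      m ++ [next_pos]) mygrammar

-- ===== PORT B =====
def grammar_alt (length : Int) : List Int :=
  let result : List Int :=
    (PySem.List.pyRange 0 length 1).map (fun i =>
      PySem.List.pyGetD ([1, 0, 2] : List Int) (PySem.Int.mod i 3) 0 + 3 * PySem.Int.floordiv i 3)
  if PySem.Int.mod length 3 = 1 then PySem.List.pySetD result (-1) (length - 1)  -- result[-1] = length-1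
  else result

-- ===== PRECONDITION & SPEC =====
-- Pre_ excludes length <= 0, where the Python A raises ValueError.
def Pre_grammar (length : Int) : Prop := 1 ≤ length
instance (length : Int) : Decidable (Pre_grammar length) := by unfold Pre_grammar; infer_instance
def pvWitness_grammar : Int := 7
def Spec_grammar (length : Int) (out : List Int) : Prop := out = grammar_alt length
instance (length : Int) (out : List Int) : Decidable (Spec_grammar length out) := by unfold Spec_grammar; infer_instance

-- ===== CLAIM (what is proved, stated in full; the proofs are below) =====
def Claim_equal_grammar : Prop := ∀ (length : Int), Dom_grammar length → Pre_grammar length → Spec_grammar length (grammar length)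

-- ===== LEMMAS AND PROOFS =====

-- the closed-form value of position k (Nat form of B's comprehension body)
def gval (k : Nat) : Int :=
  PySem.List.pyGetD ([1, 0, 2] : List Int) (PySem.Int.mod (k : Int) 3) 0 + 3 * PySem.Int.floordiv (k : Int) 3

theorem gval_eq (k : Nat) : gval k = ([1, 0, 2] : List Int).getD (k % 3) 0 + 3 * (k / 3 : Nat) := by
  simp only [gval]
  rw [show PySem.Int.mod (k : Int) 3 = ((k % 3 : Nat) : Int) by
        rw [PySem.Int.mod_eq_emod_of_pos (by omega)]; omega,
      show PySem.Int.floordiv (k : Int) 3 = ((k / 3 : Nat) : Int) by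
        rw [PySem.Int.floordiv_eq_ediv_of_pos (by omega)]; omega,
      PySem.List.pyGetD_natCast]

theorem gval_add_three (k : Nat) : gval (k + 3) = gval k + 3 := by
  rw [gval_eq, gval_eq]
  have h1 : (k + 3) % 3 = k % 3 := by omega
  have h2 : (k + 3) / 3 = k / 3 + 1 := by omega
  rw [h1, h2]
  push_cast
  ring

-- A's loop invariant over the first m iterations (i = 3, …, 3+m-1)
theorem loopA (length : Int) (m : Nat) (hm : (m : Int) + 3 ≤ length) :
    (List.range m).foldl (fun (x : List Int) (y : Nat) =>
        x ++ [if PySem.Int.mod length 3 = 1 ∧ 3 + (y : Int) = length - 1 then length - 1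
              else PySem.List.pyGetD x (3 + (y : Int) - 3) 0 + 3]) [1, 0, 2] =
      if PySem.Int.mod length 3 = 1 ∧ (m : Int) + 3 = length then
        (List.range (m + 2)).map gval ++ [length - 1]
      else (List.range (m + 3)).map gval := by
  induction m with
  | zero =>
    rw [List.range_zero, List.foldl_nil,
        if_neg (by
          rintro ⟨hmod, hlen⟩
          have h3 : length = 3 := by push_cast at hlen; omega
          subst h3; revert hmod; decide)]
    decide
  | succ m ih =>
    have hm' : (m : Int) + 3 ≤ length := by push_cast at hm ⊢; omega
    have hne : ¬ (PySem.Int.mod length 3 = 1 ∧ (m : Int) + 3 = length) := by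
      rintro ⟨_, h2⟩; push_cast at hm; omega
    rw [List.range_succ, List.foldl_append, ih hm', if_neg hne,
        List.foldl_cons, List.foldl_nil]
    by_cases hov : PySem.Int.mod length 3 = 1 ∧ (3 : Int) + (m : Int) = length - 1
    · obtain ⟨ha, hb⟩ := hov
      rw [if_pos ⟨ha, hb⟩, if_pos ⟨ha, by omega⟩]
    · have hov' : ¬ (PySem.Int.mod length 3 = 1 ∧ ((m + 1 : Nat) : Int) + 3 = length) := by
        rintro ⟨hA, h2⟩
        exact hov ⟨hA, by push_cast at h2; omega⟩
      rw [if_neg hov, if_neg hov']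
      have hidx : (3 : Int) + (m : Int) - 3 = ((m : Nat) : Int) := by push_cast; ring
      rw [hidx, PySem.List.pyGetD_natCast]
      have hget : (((List.range (m + 3)).map gval)).getD m 0 = gval m := by
        rw [List.getD_eq_getElem?_getD, List.getElem?_map, List.getElem?_range (by omega)]
        simp
      rw [hget, show gval m + 3 = gval (m + 3) from (gval_add_three m).symm]
      have hr : List.range (m + 1 + 3) = List.range (m + 3) ++ [m + 3] := by
        rw [show m + 1 + 3 = (m + 3) + 1 by omega, List.range_succ]
      rw [hr, List.map_append, List.map_singleton]

-- B's comprehension is the map of gval over range length.toNat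
theorem altMap (length : Int) (h : 0 ≤ length) :
    (PySem.List.pyRange 0 length 1).map (fun i =>
      PySem.List.pyGetD ([1, 0, 2] : List Int) (PySem.Int.mod i 3) 0 + 3 * PySem.Int.floordiv i 3) =
    (List.range length.toNat).map gval := by
  rw [PySem.List.pyRange_one]
  have : ((length : Int) - 0).toNat = length.toNat := by omega
  rw [this, List.map_map]
  apply List.map_congr_left
  intro k _
  simp [gval]

theorem pySetD_neg_one_append (xs : List Int) (x v : Int) :
    PySem.List.pySetD (xs ++ [x]) (-1) v = xs ++ [v] := by
  simp [PySem.List.pySetD, PySem.List.pySet?, PySem.List.pyIdx?]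

-- ===== VERDICT (by name: the statement is the Claim_ definition above) =====
theorem grammar_spec : Claim_equal_grammar := by
  intro length _ hpre
  unfold Spec_grammar grammar grammar_alt Pre_grammar at *
  by_cases h1 : length = 1
  · subst h1; decide
  by_cases h2 : length = 2
  · subst h2; decide
  -- length ≥ 3
  have h3 : 3 ≤ length := by omega
  have hle : ¬ length ≤ 0 := by omega
  simp only [if_neg hle, if_neg h1, if_neg h2]
  rw [altMap length (by omega)]
  -- rewrite A's fold over pyRange into a fold over List.range
  rw [PySem.List.pyRange_one]
  rw [List.foldl_map]
  set m : Nat := (length - 3).toNat with hmdef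
  have hm : (m : Int) + 3 ≤ length := by omega
  have hml : (m : Int) = length - 3 := by omega
  rw [loopA length m hm]
  have hn : length.toNat = m + 3 := by omega
  by_cases hov : PySem.Int.mod length 3 = 1
  · rw [if_pos ⟨hov, by omega⟩, if_pos hov, hn]
    have hr : List.range (m + 3) = List.range (m + 2) ++ [m + 2] := by
      rw [show m + 3 = (m + 2) + 1 by omega, List.range_succ]
    rw [hr, List.map_append, List.map_singleton, pySetD_neg_one_append]
  · rw [if_neg (by tauto), if_neg hov, hn]
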